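-- pv_equiv track=rewrite | github.com/toranan/CodeBrainer | scripts/generate_testcases.py | solve_problem_2220
-- ===== SOURCE A (Python) =====
-- def solve_problem_2220(input_data):
--     """힙 정렬 - 최대 Swap 힙 구성"""
--     n = int(input_data.strip())
--     if n == 1:
--         return "1"
--     heap = [0] * (n + 1)
--     heap[1] = n
--     for i in range(n - 1, 0, -1):
--         heap[2] = i
--         j = 2
--         while 2 * j <= n:
--             if 2 * j + 1 <= n and heap[2 * j + 1] > heap[2 * j]:
--                 heap[j], heap[2 * j + 1] = heap[2 * j + 1], heap[j]
--                 j = 2 * j + 1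
--             else:
--                 heap[j], heap[2 * j] = heap[2 * j], heap[j]
--                 j = 2 * j
--     return ' '.join(map(str, heap[1:]))
-- ===== SOURCE B (Python) =====
-- def solve_problem_2220(input_data):
--     """Closed form: the simulation's shift-register along the left spine leaves
--     heap[1]=n, heap[2**k]=m+1-k for k=1..m (m=floor(log2 n)), zeros elsewhere."""
--     n = int(input_data.strip())
--     if n == 1:
--         return "1"
--     m = n.bit_length() - 1
--     res = [0] * (n + 1)
--     res[1] = n
--     for k in range(1, m + 1):
--         res[2 ** k] = m + 1 - k
--     return ' '.join(map(str, res[1:]))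
-- ===== Notes on version B (the rewrite author's own statement) =====
-- stated objective: faster
-- what changed: Replaced the O(n log n) repeated sift-down heap simulation by a closed form: the simulation is a shift register along the left spine, so B directly writes heap[1]=n and heap[2^k]=m+1-k (m=floor(log2 n)) into a zero array in one O(n) pass.
import Mathlib
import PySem

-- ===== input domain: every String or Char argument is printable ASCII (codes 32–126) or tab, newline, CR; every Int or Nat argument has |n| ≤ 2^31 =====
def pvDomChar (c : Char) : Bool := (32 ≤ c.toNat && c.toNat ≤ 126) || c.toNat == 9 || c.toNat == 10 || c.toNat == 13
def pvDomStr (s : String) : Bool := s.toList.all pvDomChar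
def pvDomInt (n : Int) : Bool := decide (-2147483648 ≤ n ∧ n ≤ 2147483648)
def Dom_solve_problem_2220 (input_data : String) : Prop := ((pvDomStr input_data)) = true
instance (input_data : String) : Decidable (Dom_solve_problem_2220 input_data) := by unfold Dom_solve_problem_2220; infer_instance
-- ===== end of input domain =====

-- B replaces A's O(n log n) sift-down simulation by the closed form the simulation
-- converges to (heap[1]=n, heap[2^k]=m+1-k for m=⌊log2 n⌋), built in one O(n) pass.

-- ===== PORT A =====
-- ' '.join(map(str, xs))
def pvJoinInts (xs : List Int) : String :=
  PySem.Str.join " " (xs.map PySem.Int.toStr)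

-- the inner `while 2*j <= n:` loop of A.  `fuel` only makes the recursion structural:
-- under Pre_ every index access is in range (so getD/set are exact for heap[..]), and the
-- loop doubles j each pass, so with the caller's fuel = n ≥ 2 the fuel never runs out.
def pvSiftA (n : Nat) (fuel : Nat) (heap : List Int) (j : Nat) : List Int :=
  match fuel with
  | 0 => heap
  | fuel + 1 =>
    if 2 * j ≤ n then
      if 2 * j + 1 ≤ n ∧ heap.getD (2 * j) 0 < heap.getD (2 * j + 1) 0 then
        pvSiftA n fuel ((heap.set j (heap.getD (2*j+1) 0)).set (2*j+1) (heap.getD j 0)) (2*j+1)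
      else
        pvSiftA n fuel ((heap.set j (heap.getD (2*j) 0)).set (2*j) (heap.getD j 0)) (2*j)
    else heap

-- the outer `for i in range(n-1, 0, -1):` loop, recursing on the loop counter i
def pvLoopA (n : Nat) (heap : List Int) (i : Nat) : List Int :=
  match i with
  | 0 => heap
  | i + 1 => pvLoopA n (pvSiftA n n (heap.set 2 ((i + 1 : Nat) : Int)) 2) i

def solve_problem_2220 (input_data : String) : String :=
  match PySem.Int.ofStr? (PySem.Str.strip input_data) with
  | none => ""            -- int() raises ValueError; excluded by Pre_
  | some n =>
    if n = 1 then "1"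
    else
      -- Pre_ gives 1 ≤ n, so n.toNat = n exactly; n ≤ 0 raises IndexError and is excluded
      let N := n.toNat
      let heap := (List.replicate (N + 1) (0 : Int)).set 1 n
      pvJoinInts ((pvLoopA N heap (N - 1)).drop 1)

-- ===== PORT B =====
def solve_problem_2220_alt (input_data : String) : String :=
  match PySem.Int.ofStr? (PySem.Str.strip input_data) with
  | none => ""            -- int() raises ValueError; excluded by Pre_
  | some n =>
    if n = 1 then "1"
    else
      let N := n.toNat    -- Pre_ gives 1 ≤ n
      let m := N.log2     -- n.bit_length() - 1 = Nat.log2 n for n ≥ 1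
      let res := (List.replicate (N + 1) (0 : Int)).set 1 n
      let res := (PySem.List.pyRange 1 ((m : Int) + 1)).foldl
          (fun r k => r.set (2 ^ k.toNat) ((m : Int) + 1 - k)) res
      pvJoinInts (res.drop 1)

-- ===== PRECONDITION & SPEC =====
-- Pre_: int(input_data.strip()) parses and is ≥ 1; otherwise A raises (ValueError from
-- int(), or IndexError from heap[1] when n ≤ 0).
def Pre_solve_problem_2220 (input_data : String) : Prop :=
  0 < (PySem.Int.ofStr? (PySem.Str.strip input_data)).getD 0
instance (input_data : String) : Decidable (Pre_solve_problem_2220 input_data) := by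
  unfold Pre_solve_problem_2220; infer_instance

def pvWitness_solve_problem_2220 : String := "6"

def Spec_solve_problem_2220 (input_data : String) (out : String) : Prop := out = solve_problem_2220_alt input_data
instance (input_data : String) (out : String) : Decidable (Spec_solve_problem_2220 input_data out) := by unfold Spec_solve_problem_2220; infer_instance

-- ===== CLAIM (what is proved, stated in full; the proofs are below) =====
def Claim_equal_solve_problem_2220 : Prop := ∀ (input_data : String), Dom_solve_problem_2220 input_data → Pre_solve_problem_2220 input_data → Spec_solve_problem_2220 input_data (solve_problem_2220 input_data)

-- ===== LEMMAS AND PROOFS =====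

-- lists of length N+1 described by a function on positions
def pvMk (N : Nat) (f : Nat → Int) : List Int := (List.range (N + 1)).map f

-- the heap state after the outer iteration with counter i (i = N means: before any
-- iteration): heap[1] = N, heap[2^t] = i + ⌊log2 N⌋ - t while that value is ≤ N-1, else 0.
def pvStV (N i p : Nat) : Int :=
  if p = 1 then (N : Int)
  else if 2 ^ p.log2 = p ∧ p.log2 ≤ N.log2 ∧ i + N.log2 ≤ N - 1 + p.log2 then
    ((i + N.log2 - p.log2 : Nat) : Int)
  else 0

-- the heap mid-sift, with the sifted value i sitting at position 2^s
def pvMidV (N i s p : Nat) : Int :=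
  if p = 1 then (N : Int)
  else if 2 ^ p.log2 = p ∧ p.log2 ≤ N.log2 then
    (if p.log2 < s then pvStV N i p else if p.log2 = s then (i : Int) else pvStV N (i + 1) p)
  else 0

lemma pvMk_getD (N : Nat) (f : Nat → Int) (p : Nat) :
    (pvMk N f).getD p 0 = if p ≤ N then f p else 0 := by
  unfold pvMk
  rcases Nat.lt_or_ge p (N + 1) with h | h
  · rw [List.getD_eq_getElem?_getD]
    simp [h, Nat.lt_succ_iff.mp h]
  · rw [List.getD_eq_getElem?_getD]
    have : ¬ p ≤ N := by omega
    simp [this, Nat.not_lt.mpr h]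

lemma pvMk_set (N : Nat) (f : Nat → Int) (p : Nat) (v : Int) :
    (pvMk N f).set p v = pvMk N (fun q => if q = p then v else f q) := by
  apply List.ext_getElem
  · simp [pvMk]
  · intro i h1 h2
    simp only [pvMk, List.length_map, List.length_range] at h2
    rcases eq_or_ne i p with rfl | hne
    · simp [pvMk]
    · simp [pvMk, hne, Ne.symm hne]

lemma pvMk_congr (N : Nat) (f g : Nat → Int) (h : ∀ p, p ≤ N → f p = g p) :
    pvMk N f = pvMk N g := by
  unfold pvMk
  exact List.map_congr_left fun p hp =>
    h p (Nat.lt_succ_iff.mp (List.mem_range.mp hp))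

lemma pvNotPow2 (a t : Nat) (ht : 1 ≤ t) : 2 ^ a ≠ 2 ^ t + 1 := by
  intro h
  cases a with
  | zero =>
    have : 1 ≤ 2 ^ t := Nat.one_le_two_pow
    simp only [pow_zero] at h
    omega
  | succ a =>
    obtain ⟨t', rfl⟩ : ∃ t', t = t' + 1 := ⟨t - 1, by omega⟩
    have h1 : 2 ^ (a + 1) = 2 * 2 ^ a := by ring
    have h2 : 2 ^ (t' + 1) = 2 * 2 ^ t' := by ring
    omega

lemma pvStV_nonneg (N i p : Nat) : 0 ≤ pvStV N i p := by
  unfold pvStV; split_ifs <;> positivity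

-- shift: the value at spine node 2^t after iteration i is the value one level deeper
-- after iteration i+1
lemma pvStV_shift (N i t : Nat) (h1 : 1 ≤ t) (h2 : t < N.log2) :
    pvStV N i (2 ^ t) = pvStV N (i + 1) (2 ^ (t + 1)) := by
  have e1 : (2 : Nat) ^ t ≠ 1 := by
    have : 2 ≤ 2 ^ t := by calc 2 = 2 ^ 1 := by norm_num
                                _ ≤ 2 ^ t := Nat.pow_le_pow_right (by norm_num) h1
    omega
  have e2 : (2 : Nat) ^ (t + 1) ≠ 1 := by
    have : 2 ≤ 2 ^ (t + 1) := by calc 2 = 2 ^ 1 := by norm_num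
                                _ ≤ 2 ^ (t + 1) := Nat.pow_le_pow_right (by norm_num) (by omega)
    omega
  unfold pvStV
  rw [if_neg e1, if_neg e2]
  simp only [Nat.log2_two_pow, true_and]
  split_ifs with c1 c2 c2
  · congr 1; omega
  · exact absurd ⟨by omega, by omega⟩ c2
  · exact absurd ⟨by omega, by omega⟩ c1
  · rfl

lemma pvStV_bottom (N i : Nat) (hN : 2 ≤ N) (hi : i ≤ N - 1) :
    pvStV N i (2 ^ N.log2) = ((i : Nat) : Int) := by
  have hm1 : 1 ≤ N.log2 := (Nat.le_log2 (by omega)).mpr (by simpa using hN)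
  have e1 : (2 : Nat) ^ N.log2 ≠ 1 := by
    have : 2 ≤ 2 ^ N.log2 := by calc 2 = 2 ^ 1 := by norm_num
                                _ ≤ 2 ^ N.log2 := Nat.pow_le_pow_right (by norm_num) hm1
    omega
  unfold pvStV
  rw [if_neg e1, Nat.log2_two_pow, if_pos ⟨rfl, le_refl _, by omega⟩]
  congr 1; omega

lemma pvPowNe1 (s : Nat) (hs : 1 ≤ s) : (2 : Nat) ^ s ≠ 1 := by
  have : 2 ≤ 2 ^ s := by
    calc 2 = 2 ^ 1 := by norm_num
    _ ≤ 2 ^ s := Nat.pow_le_pow_right (by norm_num) hs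
  omega

lemma pvMidV_nonneg (N i s p : Nat) : 0 ≤ pvMidV N i s p := by
  unfold pvMidV
  split_ifs <;> first | positivity | exact pvStV_nonneg _ _ _

lemma pvMidV_at_s (N i s : Nat) (hs : 1 ≤ s) (hsm : s ≤ N.log2) :
    pvMidV N i s (2 ^ s) = (i : Int) := by
  unfold pvMidV
  rw [if_neg (pvPowNe1 s hs), Nat.log2_two_pow, if_pos ⟨rfl, hsm⟩, if_neg (by omega), if_pos rfl]

lemma pvMidV_above (N i s t : Nat) (hst : s < t) (htm : t ≤ N.log2) :
    pvMidV N i s (2 ^ t) = pvStV N (i + 1) (2 ^ t) := by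
  unfold pvMidV
  rw [if_neg (pvPowNe1 t (by omega)), Nat.log2_two_pow, if_pos ⟨rfl, htm⟩,
    if_neg (by omega), if_neg (by omega)]

-- the effect of one swap of A's sift, pointwise on positions
lemma pvMid_step (N i s : Nat) (hs : 1 ≤ s) (hs1 : s + 1 ≤ N.log2)
    (p : Nat) (hp : p ≤ N) :
    (if p = 2 ^ (s + 1) then pvMidV N i s (2 ^ s)
     else if p = 2 ^ s then pvMidV N i s (2 ^ (s + 1))
     else pvMidV N i s p) = pvMidV N i (s + 1) p := by
  by_cases e1 : p = 2 ^ (s + 1)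
  · subst e1
    rw [if_pos rfl, pvMidV_at_s N i s hs (by omega), pvMidV_at_s N i (s + 1) (by omega) hs1]
  · rw [if_neg e1]
    by_cases e2 : p = 2 ^ s
    · subst e2
      rw [if_pos rfl, pvMidV_above N i s (s + 1) (by omega) hs1,
        ← pvStV_shift N i s hs (by omega)]
      unfold pvMidV
      rw [if_neg (pvPowNe1 s hs), Nat.log2_two_pow, if_pos ⟨rfl, by omega⟩, if_pos (by omega)]
    · rw [if_neg e2]
      by_cases hp1 : p = 1
      · simp [pvMidV, hp1]
      · by_cases hsp : 2 ^ p.log2 = p ∧ p.log2 ≤ N.log2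
        · have hts : p.log2 ≠ s := fun h => e2 (by rw [← hsp.1, h])
          have hts1 : p.log2 ≠ s + 1 := fun h => e1 (by rw [← hsp.1, h])
          unfold pvMidV
          rw [if_neg hp1, if_pos hsp, if_neg hp1, if_pos hsp]
          rcases Nat.lt_or_ge p.log2 s with h | h
          · rw [if_pos h, if_pos (by omega)]
          · rw [if_neg (by omega), if_neg hts, if_neg (by omega), if_neg hts1]
        · simp only [pvMidV, if_neg hp1, if_neg hsp]

-- at the settled level s = log2 N the mid-state IS the settled state
lemma pvMid_done (N i : Nat) (hN : 2 ≤ N) (hi : i ≤ N - 1)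
    (p : Nat) : pvMidV N i N.log2 p = pvStV N i p := by
  by_cases hp1 : p = 1
  · simp [pvMidV, pvStV, hp1]
  · by_cases hsp : 2 ^ p.log2 = p ∧ p.log2 ≤ N.log2
    · rcases Nat.lt_or_ge p.log2 N.log2 with hlt | hge
      · simp only [pvMidV, if_neg hp1, if_pos hsp, if_pos hlt]
      · have heq : p.log2 = N.log2 := by omega
        have hp2 : p = 2 ^ N.log2 := by rw [← hsp.1, heq]
        simp only [pvMidV, if_neg hp1, if_pos hsp, if_neg (by omega : ¬ p.log2 < N.log2),
          if_pos heq]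
        rw [hp2, pvStV_bottom N i hN hi]
    · have hc : ¬ (2 ^ p.log2 = p ∧ p.log2 ≤ N.log2 ∧ i + N.log2 ≤ N - 1 + p.log2) := by
        rintro ⟨a, b, -⟩; exact hsp ⟨a, b⟩
      simp only [pvMidV, pvStV, if_neg hp1, if_neg hsp, if_neg hc]

-- one full sift-down from spine level s rotates the spine and reaches the settled state
lemma pvSift_chain (N i : Nat) (hN : 2 ≤ N) (hi : i ≤ N - 1) :
    ∀ (k s fuel : Nat), 1 ≤ s → s + k = N.log2 → k ≤ fuel →
      pvSiftA N (fuel + 1) (pvMk N (pvMidV N i s)) (2 ^ s) = pvMk N (pvStV N i) := by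
  intro k
  induction k with
  | zero =>
    intro s fuel hs hsum _
    have hsm : s = N.log2 := by omega
    subst hsm
    rw [pvSiftA]
    rw [if_neg (by
      have h1 := Nat.lt_log2_self (n := N)
      have h2 : 2 * 2 ^ N.log2 = 2 ^ (N.log2 + 1) := by ring
      omega)]
    exact pvMk_congr _ _ _ (fun p _ => pvMid_done N i hN hi p)
  | succ k ih =>
    intro s fuel hs hsum hfuel
    obtain ⟨fuel', rfl⟩ : ∃ f', fuel = f' + 1 := ⟨fuel - 1, by omega⟩
    have hm0 : N ≠ 0 := by omega
    have hs1 : s + 1 ≤ N.log2 := by omega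
    have hp1 : 2 ^ (s + 1) ≤ N := (Nat.le_log2 hm0).mp hs1
    have hps : 2 ^ s ≤ N := (Nat.le_log2 hm0).mp (by omega)
    have h1p : 1 ≤ (2 : Nat) ^ s := Nat.one_le_two_pow
    have h2s : 2 * 2 ^ s = 2 ^ (s + 1) := by ring
    rw [pvSiftA]
    rw [if_pos (by omega)]
    rw [if_neg (by
      rintro ⟨hle, hlt⟩
      simp only [pvMk_getD] at hlt
      rw [if_pos (by omega : 2 * 2 ^ s ≤ N), if_pos hle] at hlt
      have hq0 : pvMidV N i s (2 * 2 ^ s + 1) = 0 := by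
        unfold pvMidV
        rw [if_neg (by omega)]
        rw [if_neg (by
          rintro ⟨ha, -⟩
          have hnp := pvNotPow2 ((2 * 2 ^ s + 1).log2) (s + 1) (by omega)
          omega)]
      have hq1 := pvMidV_nonneg N i s (2 * 2 ^ s)
      omega)]
    have hga : (pvMk N (pvMidV N i s)).getD (2 * 2 ^ s) 0 = pvMidV N i s (2 ^ (s + 1)) := by
      rw [pvMk_getD, if_pos (by omega), h2s]
    have hgb : (pvMk N (pvMidV N i s)).getD (2 ^ s) 0 = pvMidV N i s (2 ^ s) := by
      rw [pvMk_getD, if_pos hps]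
    rw [hga, hgb, pvMk_set, pvMk_set, h2s]
    rw [pvMk_congr _ _ _ (fun p hp => pvMid_step N i s hs hs1 p hp)]
    exact ih (s + 1) fuel' (by omega) (by omega) (by omega)

lemma pvLoop_lemma (N : Nat) (hN : 2 ≤ N) :
    ∀ i, i ≤ N - 1 → pvLoopA N (pvMk N (pvStV N (i + 1))) i = pvMk N (pvStV N 1) := by
  have hm0 : N ≠ 0 := by omega
  have hm1 : 1 ≤ N.log2 := (Nat.le_log2 hm0).mpr (by simpa using hN)
  have hmN : N.log2 ≤ N - 1 := by
    have := (Nat.log2_lt hm0).mpr (Nat.lt_two_pow_self (n := N))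
    omega
  intro i
  induction i with
  | zero => intro _; simp [pvLoopA]
  | succ i ih =>
    intro h
    rw [pvLoopA]
    have hset : (pvMk N (pvStV N (i + 1 + 1))).set 2 ((i + 1 : Nat) : Int)
        = pvMk N (pvMidV N (i + 1) 1) := by
      rw [pvMk_set]
      apply pvMk_congr
      intro p hp
      by_cases e2 : p = 2
      · subst e2
        rw [if_pos rfl]
        have : pvMidV N (i + 1) 1 (2 ^ 1) = ((i + 1 : Nat) : Int) :=
          pvMidV_at_s N (i + 1) 1 (le_refl _) hm1
        simpa using this.symm
      · rw [if_neg e2]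
        by_cases hp1 : p = 1
        · simp [pvStV, pvMidV, hp1]
        · by_cases hsp : 2 ^ p.log2 = p ∧ p.log2 ≤ N.log2
          · have ht1 : 1 ≤ p.log2 := by
              rcases Nat.eq_zero_or_pos p.log2 with h0 | h1
              · exfalso; rw [h0] at hsp; simp at hsp; omega
              · exact h1
            have hts : p.log2 ≠ 1 := by
              intro h1
              apply e2; rw [← hsp.1, h1]; norm_num
            simp only [pvMidV, if_neg hp1, if_pos hsp, if_neg (by omega : ¬ p.log2 < 1),
              if_neg hts]
          · have hc : ¬ (2 ^ p.log2 = p ∧ p.log2 ≤ N.log2 ∧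
                (i + 1 + 1) + N.log2 ≤ N - 1 + p.log2) := by
              rintro ⟨a, b, -⟩; exact hsp ⟨a, b⟩
            simp only [pvStV, pvMidV, if_neg hp1, if_neg hc, if_neg hsp]
    rw [hset]
    have hchain := pvSift_chain N (i + 1) hN (by omega)
      (N.log2 - 1) 1 (N - 1) (le_refl _) (by omega) (by omega)
    have e : N - 1 + 1 = N := by omega
    rw [e] at hchain
    rw [show (2 : Nat) ^ 1 = 2 by norm_num] at hchain
    rw [hchain]
    exact ih (by omega)

lemma pvInit (N : Nat) (n : Int) (hn : n = (N : Int)) (hN : 2 ≤ N) :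
    (List.replicate (N + 1) (0 : Int)).set 1 n = pvMk N (pvStV N N) := by
  have hrep : List.replicate (N + 1) (0 : Int) = pvMk N (fun _ => 0) := by
    simp [pvMk, List.map_const']
  rw [hrep, pvMk_set]
  apply pvMk_congr
  intro p hp
  by_cases hp1 : p = 1
  · simp [pvStV, hp1, hn]
  · rw [if_neg hp1]
    have hc : ¬ (2 ^ p.log2 = p ∧ p.log2 ≤ N.log2 ∧ N + N.log2 ≤ N - 1 + p.log2) := by
      rintro ⟨-, b, c⟩; omega
    simp only [pvStV, if_neg hp1, if_neg hc]

-- B's fill loop produces the settled state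
-- B's heap positions after the writes for k = 1 .. j
def pvG (N j p : Nat) : Int :=
  if p = 1 then (N : Int)
  else if 2 ^ p.log2 = p ∧ 1 ≤ p.log2 ∧ p.log2 ≤ j then ((N.log2 + 1 - p.log2 : Nat) : Int)
  else 0

lemma pvFill_inv (N : Nat) (hN : 2 ≤ N) :
    ∀ (c j : Nat), j + c = N.log2 →
      (PySem.List.pyRange ((j : Int) + 1) ((N.log2 : Int) + 1)).foldl
          (fun r k => r.set (2 ^ k.toNat) ((N.log2 : Int) + 1 - k)) (pvMk N (pvG N j))
        = pvMk N (pvG N N.log2) := by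
  intro c
  induction c with
  | zero =>
    intro j hj
    have hj' : j = N.log2 := by omega
    subst hj'
    rw [PySem.List.pyRange_one]
    simp
  | succ c ih =>
    intro j hj
    rw [PySem.List.pyRange_one_cons (by omega)]
    rw [List.foldl_cons]
    have hjm : j + 1 ≤ N.log2 := by omega
    have hple : 2 ^ (j + 1) ≤ N := (Nat.le_log2 (by omega)).mp hjm
    have htn : ((j : Int) + 1).toNat = j + 1 := by omega
    have hval : (N.log2 : Int) + 1 - ((j : Int) + 1) = ((N.log2 - j : Nat) : Int) := by
      rw [Nat.cast_sub (by omega : j ≤ N.log2)]; ring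
    rw [htn, hval, pvMk_set]
    have hstep : pvMk N (fun q => if q = 2 ^ (j + 1) then ((N.log2 - j : Nat) : Int)
        else pvG N j q) = pvMk N (pvG N (j + 1)) := by
      apply pvMk_congr
      intro p hp
      by_cases e1 : p = 2 ^ (j + 1)
      · subst e1
        rw [if_pos rfl]
        unfold pvG
        rw [if_neg (pvPowNe1 (j + 1) (by omega)), Nat.log2_two_pow,
          if_pos ⟨rfl, by omega, le_refl _⟩]
        congr 1; omega
      · rw [if_neg e1]
        unfold pvG
        by_cases hp1 : p = 1
        · simp [hp1]
        · rw [if_neg hp1, if_neg hp1]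
          by_cases hsp : 2 ^ p.log2 = p ∧ 1 ≤ p.log2 ∧ p.log2 ≤ j
          · rw [if_pos hsp, if_pos ⟨hsp.1, hsp.2.1, by omega⟩]
          · rw [if_neg hsp, if_neg (by
              rintro ⟨a, b, c2⟩
              have : p.log2 ≠ j + 1 := fun h => e1 (by rw [← a, h])
              exact hsp ⟨a, b, by omega⟩)]
    rw [hstep]
    have hcast : ((j : Int) + 1) = ((j + 1 : Nat) : Int) := by push_cast; ring
    rw [hcast]
    exact ih (j + 1) (by omega)

lemma pvFill (N : Nat) (n : Int) (hn : n = (N : Int)) (hN : 2 ≤ N) :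
    (PySem.List.pyRange 1 ((N.log2 : Int) + 1)).foldl
        (fun r k => r.set (2 ^ k.toNat) ((N.log2 : Int) + 1 - k))
        ((List.replicate (N + 1) (0 : Int)).set 1 n)
      = pvMk N (pvStV N 1) := by
  have hm0 : N ≠ 0 := by omega
  have hm1 : 1 ≤ N.log2 := (Nat.le_log2 hm0).mpr (by simpa using hN)
  have hmN : N.log2 ≤ N - 1 := by
    have := (Nat.log2_lt hm0).mpr (Nat.lt_two_pow_self (n := N))
    omega
  have hbase : (List.replicate (N + 1) (0 : Int)).set 1 n = pvMk N (pvG N 0) := by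
    have hrep : List.replicate (N + 1) (0 : Int) = pvMk N (fun _ => 0) := by
      simp [pvMk, List.map_const']
    rw [hrep, pvMk_set]
    apply pvMk_congr
    intro p hp
    by_cases hp1 : p = 1
    · simp [pvG, hp1, hn]
    · rw [if_neg hp1]
      simp only [pvG, if_neg hp1, if_neg (by rintro ⟨-, b, c⟩; omega :
        ¬ (2 ^ p.log2 = p ∧ 1 ≤ p.log2 ∧ p.log2 ≤ 0))]
  rw [hbase]
  have hstart := pvFill_inv N hN N.log2 0 (by omega)
  norm_num at hstart
  rw [hstart]
  apply pvMk_congr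
  intro p hp
  by_cases hp1 : p = 1
  · simp [pvG, pvStV, hp1]
  · by_cases hsp : 2 ^ p.log2 = p ∧ 1 ≤ p.log2 ∧ p.log2 ≤ N.log2
    · simp only [pvG, pvStV, if_neg hp1, if_pos hsp,
        if_pos (⟨hsp.1, hsp.2.2, by omega⟩ : 2 ^ p.log2 = p ∧ p.log2 ≤ N.log2 ∧
          1 + N.log2 ≤ N - 1 + p.log2)]
      congr 1; omega
    · have ht0 : 2 ^ p.log2 = p → 1 ≤ p.log2 := by
        intro a
        rcases Nat.eq_zero_or_pos p.log2 with h0 | h1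
        · exfalso; rw [h0] at a; simp at a; exact hp1 a.symm
        · exact h1
      have hc2 : ¬ (2 ^ p.log2 = p ∧ p.log2 ≤ N.log2 ∧ 1 + N.log2 ≤ N - 1 + p.log2) := by
        rintro ⟨a, b, -⟩; exact hsp ⟨a, ht0 a, b⟩
      simp only [pvG, pvStV, if_neg hp1, if_neg hsp, if_neg hc2]

-- ===== VERDICT (by name: the statement is the Claim_ definition above) =====
theorem solve_problem_2220_spec : Claim_equal_solve_problem_2220 := by
  intro s _ hpre
  unfold Pre_solve_problem_2220 at hpre
  unfold Spec_solve_problem_2220 solve_problem_2220 solve_problem_2220_alt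
  cases hof : PySem.Int.ofStr? (PySem.Str.strip s) with
  | none => simp [hof] at hpre
  | some n =>
    rw [hof] at hpre
    simp only [Option.getD_some] at hpre
    by_cases h1 : n = 1
    · simp [h1]
    · simp only [if_neg h1]
      have hn2 : 2 ≤ n.toNat := by omega
      have hn : n = (n.toNat : Int) := by omega
      have e : n.toNat - 1 + 1 = n.toNat := by omega
      have hloop := pvLoop_lemma n.toNat hn2 (n.toNat - 1) (le_refl _)
      rw [e] at hloop
      have hfill := pvFill n.toNat n hn hn2
      rw [pvInit n.toNat n hn hn2] at hfill
      rw [pvInit n.toNat n hn hn2, hloop, hfill]
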